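-- pv_equiv track=rewrite | github.com/ayoubzulfiqar/Leetcode-Medium | MaximumNumberofPeopleThatCanBeCaughtinTag/maximum_number_of_people_that_can_be_caught_in_tag.py | maximumCaughtPeople
-- ===== SOURCE A (Python) =====
-- import collections
--
-- def maximumCaughtPeople(tag: list[int], dist: int) -> int:
--     uncaught_people_indices = collections.deque()
--     caught_pairs = 0
--
--     for i in range(len(tag)):
--         if tag[i] == 1:
--             # This is a person.
--             # Remove people from the left of the deque who are now too far to form a pair with current person 'i'.
--             # A person at 'p_idx' is too far if 'i - p_idx > dist'.
--             while uncaught_people_indices and uncaught_people_indices[0] < i - dist: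
--                 uncaught_people_indices.popleft()
--
--             # If there's anyone left in the deque, they can form a pair with person 'i'.
--             # We greedily form a pair with the earliest available person (uncaught_people_indices[0]).
--             # This leaves later available people for future potential pairings, maximizing the total.
--             if uncaught_people_indices:
--                 uncaught_people_indices.popleft() # This person is now part of a pair
--                 caught_pairs += 1
--             else:
--                 # No one to form a pair with this person 'i' from the left within 'dist'.
--                 # So, 'i' becomes a potential candidate to form a pair with future people.
--                 uncaught_people_indices.append(i)
--
--     # Each successful pair involves two people.
--     return caught_pairs * 2
-- ===== SOURCE B (Python) =====
-- def maximumCaughtPeople(tag: list[int], dist: int) -> int: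
--     # Stage 1: collect the positions of all people.
--     people = [i for i, t in enumerate(tag) if t == 1]
--     # Stage 2: greedily match consecutive positions, skipping over matched pairs.
--     pairs = 0
--     j = 0
--     while j + 1 < len(people):
--         if people[j + 1] - people[j] <= dist:
--             pairs += 1
--             j += 2
--         else:
--             j += 1
--     return pairs * 2
-- ===== Notes on version B (the rewrite author's own statement) =====
-- stated objective: alternative
-- what changed: Replaced A's single online scan of tag with a deque of unpaired people by two staged passes: first extract the list of people positions, then greedily pair consecutive positions of that list by index-skipping, never revisiting tag.
import Mathlib
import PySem

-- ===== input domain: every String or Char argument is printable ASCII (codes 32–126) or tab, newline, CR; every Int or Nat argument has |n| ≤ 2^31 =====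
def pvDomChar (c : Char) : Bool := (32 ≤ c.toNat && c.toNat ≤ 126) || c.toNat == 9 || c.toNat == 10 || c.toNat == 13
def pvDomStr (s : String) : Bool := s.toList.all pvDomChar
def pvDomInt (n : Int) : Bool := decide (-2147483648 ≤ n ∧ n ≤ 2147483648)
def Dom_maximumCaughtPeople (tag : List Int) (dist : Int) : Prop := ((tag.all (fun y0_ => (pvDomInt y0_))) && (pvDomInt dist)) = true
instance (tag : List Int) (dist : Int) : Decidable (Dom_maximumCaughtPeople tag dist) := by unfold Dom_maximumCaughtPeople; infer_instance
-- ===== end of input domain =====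

-- B replaces A's online scan of tag (deque of unpaired people) by two staged passes:
-- extract the people positions, then greedily pair consecutive positions; same cost, alternative structure.

-- ===== PORT A =====
-- the inner 'while uncaught and uncaught[0] < i - dist: popleft()' loop, literally
def pvPurge (q : List Int) (bound : Int) : List Int :=
  match q with
  | [] => []
  | x :: xs => if x < bound then pvPurge xs bound else x :: xs

-- one iteration of A's for-loop body; state = (deque, caught_pairs)
def pvStepA (dist : Int) (st : List Int × Int) (i : Int) (ti : Int) : List Int × Int :=
  if ti = 1 then
    let q := pvPurge st.1 (i - dist)
    match q with
    | [] => (q ++ [i], st.2)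
    | _ :: rest => (rest, st.2 + 1)
  else st

def maximumCaughtPeople (tag : List Int) (dist : Int) : Int :=
  let final := (PySem.List.pyRange 0 tag.length 1).foldl
    (fun st i => pvStepA dist st i (PySem.List.pyGetD tag i 0)) ([], 0)
  final.2 * 2

-- ===== PORT B =====
-- stage 2 of Source B: the while-loop over index j, transcribed as recursion on the suffix
-- of the positions list (j += 2 drops two elements, j += 1 drops one)
def pvPair (dist : Int) : List Int → Int
  | p :: q :: rest => if q - p ≤ dist then pvPair dist rest + 1 else pvPair dist (q :: rest)
  | _ => 0

def maximumCaughtPeople_alt (tag : List Int) (dist : Int) : Int :=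
  let people := ((PySem.List.enumerate tag 0).filter (fun pr => pr.2 == 1)).map (fun pr => pr.1)
  pvPair dist people * 2

-- ===== PRECONDITION & SPEC =====
def Spec_maximumCaughtPeople (tag : List Int) (dist : Int) (out : Int) : Prop := out = maximumCaughtPeople_alt tag dist
instance (tag : List Int) (dist : Int) (out : Int) : Decidable (Spec_maximumCaughtPeople tag dist out) := by unfold Spec_maximumCaughtPeople; infer_instance

-- ===== CLAIM (what is proved, stated in full; the proofs are below) =====
def Claim_equal_maximumCaughtPeople : Prop := ∀ (tag : List Int) (dist : Int), Dom_maximumCaughtPeople tag dist → Spec_maximumCaughtPeople tag dist (maximumCaughtPeople tag dist)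

-- ===== LEMMAS AND PROOFS =====

-- positions of the people among a list of (index, value) pairs
def pvPos (es : List (Int × Int)) : List Int :=
  (es.filter (fun pr => pr.2 == 1)).map (fun pr => pr.1)

-- A's fold, run over any (index, value) list from a deque of length ≤ 1, counts exactly
-- the greedy pairs of (deque ++ positions)
theorem pvFoldA_eq_pair (dist : Int) (es : List (Int × Int)) (q : List Int) (c : Int)
    (hq : q = [] ∨ ∃ p, q = [p]) :
    (es.foldl (fun st pr => pvStepA dist st pr.1 pr.2) (q, c)).2
      = c + pvPair dist (q ++ pvPos es) := by
  induction es generalizing q c with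
  | nil =>
    rcases hq with h | ⟨p, h⟩ <;> simp [h, pvPos, pvPair]
  | cons e rest ih =>
    obtain ⟨i, ti⟩ := e
    rw [List.foldl_cons]
    show (List.foldl (fun st pr => pvStepA dist st pr.1 pr.2)
        (pvStepA dist (q, c) i ti) rest).2 = c + pvPair dist (q ++ pvPos ((i, ti) :: rest))
    by_cases ht : ti = 1
    · rcases hq with h | ⟨p, h⟩
      · subst h
        have hstep : pvStepA dist ([], c) i ti = ([i], c) := by
          simp [pvStepA, ht, pvPurge]
        rw [hstep, ih [i] c (Or.inr ⟨i, rfl⟩)]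
        simp [pvPos, ht]
      · subst h
        by_cases hp : p < i - dist
        · have hstep : pvStepA dist ([p], c) i ti = ([i], c) := by
            simp [pvStepA, ht, pvPurge, hp]
          rw [hstep, ih [i] c (Or.inr ⟨i, rfl⟩)]
          have hnle : ¬ (i - p ≤ dist) := by omega
          simp [pvPos, ht, pvPair, hnle]
        · have hstep : pvStepA dist ([p], c) i ti = ([], c + 1) := by
            simp [pvStepA, ht, pvPurge, hp]
          rw [hstep, ih [] (c + 1) (Or.inl rfl)]
          have hle : i - p ≤ dist := by omega
          simp [pvPos, ht, pvPair, hle]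
          omega
    · have hstep : pvStepA dist (q, c) i ti = (q, c) := by
        simp [pvStepA, ht]
      rw [hstep, ih q c hq]
      simp [pvPos, ht]

-- ===== VERDICT (by name: the statement is the Claim_ definition above) =====
theorem maximumCaughtPeople_spec : Claim_equal_maximumCaughtPeople := by
  intro tag dist _
  unfold Spec_maximumCaughtPeople maximumCaughtPeople maximumCaughtPeople_alt
  have key : (PySem.List.enumerate tag 0).foldl
        (fun st pr => pvStepA dist st pr.1 pr.2) (([] : List Int), (0 : Int))
      = (PySem.List.pyRange 0 tag.length 1).foldl
        (fun st i => pvStepA dist st i (PySem.List.pyGetD tag i 0)) ([], 0) := by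
    rw [PySem.List.enumerate_eq_map_pyRange tag (0 : Int), List.foldl_map]
    rfl
  have h := pvFoldA_eq_pair dist (PySem.List.enumerate tag 0) [] 0 (Or.inl rfl)
  rw [key, List.nil_append, zero_add] at h
  exact congrArg (fun z => z * 2) h
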